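-- pv_equiv track=rewrite | github.com/brianfay/aoc-2021 | matt/day4/hap.py | compare_scores
-- ===== SOURCE A (Python) =====
-- def compare_scores(winning_scores, last_called):
--     final_winning_number = 0
--
--     for score in winning_scores:
--         last_score = score
--         if last_score:
--             if score >= last_score:
--                 final_winning_number = score
--             elif last_score > score:
--                 final_winning_number = last_score
--
--     return final_winning_number * last_called
-- ===== SOURCE B (Python) =====
-- def compare_scores(winning_scores, last_called):
--     for score in reversed(list(winning_scores)):
--         if score:
--             return score * last_called
--     return 0 * last_called
-- ===== Notes on version B (the rewrite author's own statement) =====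
-- stated objective: simpler
-- what changed: A's forward full pass with an overwrite accumulator (and a redundant score-vs-last_score comparison) is replaced by a backward short-circuiting scan that returns at the first truthy score from the end.
import Mathlib
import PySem

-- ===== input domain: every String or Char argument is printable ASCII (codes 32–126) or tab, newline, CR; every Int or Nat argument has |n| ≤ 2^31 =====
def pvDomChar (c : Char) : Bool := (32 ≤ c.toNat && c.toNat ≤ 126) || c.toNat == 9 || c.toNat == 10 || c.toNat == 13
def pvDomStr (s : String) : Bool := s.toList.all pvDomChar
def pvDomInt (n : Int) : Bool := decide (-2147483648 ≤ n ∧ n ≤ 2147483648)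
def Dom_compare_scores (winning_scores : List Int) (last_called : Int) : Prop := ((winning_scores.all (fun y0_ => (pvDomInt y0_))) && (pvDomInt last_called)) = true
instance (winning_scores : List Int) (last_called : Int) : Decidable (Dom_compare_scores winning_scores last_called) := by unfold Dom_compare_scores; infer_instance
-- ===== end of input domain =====

-- B replaces A's forward full pass with a backward short-circuiting scan; return value only, no side effects.

-- ===== PORT A =====
def compare_scores (winning_scores : List Int) (last_called : Int) : Int :=
  (winning_scores.foldl
    (fun final_winning_number score =>
      let last_score := score
      if last_score ≠ 0 then
        if score ≥ last_score then score
        else if last_score > score then last_score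
        else final_winning_number
      else final_winning_number)
    0) * last_called

-- ===== PORT B =====
-- first truthy score scanning the reversed list, 0 if none
def revFirst : List Int → Int
  | [] => 0
  | s :: rest => if s ≠ 0 then s else revFirst rest

def compare_scores_alt (winning_scores : List Int) (last_called : Int) : Int :=
  revFirst winning_scores.reverse * last_called

-- ===== PRECONDITION & SPEC =====
def Spec_compare_scores (winning_scores : List Int) (last_called : Int) (out : Int) : Prop := out = compare_scores_alt winning_scores last_called
instance (winning_scores : List Int) (last_called : Int) (out : Int) : Decidable (Spec_compare_scores winning_scores last_called out) := by unfold Spec_compare_scores; infer_instance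

-- ===== CLAIM (what is proved, stated in full; the proofs are below) =====
def Claim_equal_compare_scores : Prop := ∀ (winning_scores : List Int) (last_called : Int), Dom_compare_scores winning_scores last_called → Spec_compare_scores winning_scores last_called (compare_scores winning_scores last_called)

-- ===== LEMMAS AND PROOFS =====

theorem revFirst_append_singleton (xs : List Int) (x : Int) :
    revFirst (xs ++ [x]) = if revFirst xs ≠ 0 then revFirst xs
                           else if x ≠ 0 then x else 0 := by
  induction xs with
  | nil => simp [revFirst]
  | cons s rest ih =>
      simp only [List.cons_append, revFirst]
      by_cases hs : s = 0 <;> simp [hs, ih]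

theorem foldl_eq_revFirst (l : List Int) (acc : Int) :
    l.foldl
      (fun final_winning_number score =>
        let last_score := score
        if last_score ≠ 0 then
          if score ≥ last_score then score
          else if last_score > score then last_score
          else final_winning_number
        else final_winning_number)
      acc
    = if revFirst l.reverse ≠ 0 then revFirst l.reverse else acc := by
  induction l generalizing acc with
  | nil => simp [revFirst]
  | cons s rest ih =>
      simp only [List.foldl_cons, List.reverse_cons, revFirst_append_singleton]
      rw [ih]
      by_cases hr : revFirst rest.reverse = 0 <;> by_cases hs : s = 0 <;>
        simp [hr, hs]

-- ===== VERDICT (by name: the statement is the Claim_ definition above) =====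
theorem compare_scores_spec : Claim_equal_compare_scores := by
  intro ws lc _
  unfold Spec_compare_scores compare_scores compare_scores_alt
  rw [foldl_eq_revFirst]
  by_cases hr : revFirst ws.reverse = 0 <;> simp [hr]
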